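-- pv_equiv track=rewrite | github.com/CS-DaviMagalhaes/Caza-Productos | Backend/main.py | _contains_banned_terms
-- ===== SOURCE A (Python) =====
-- def _contains_banned_terms(text: str) -> bool:
--     if not text:
--         return False
--     lowered = text.lower()
--     banned_terms = [
--         "404",
--         "notfound",
--         "not-found",
--         "productlinknotfound",
--         "linknotfound",
--         "page-not-found",
--         "no-encontrado",
--         "no_encontrado",
--         "agotado",
--         "out-of-stock",
--         "out_of_stock",
--         "no-disponible",
--         "no_disponible",
--         "producto-no-disponible",
--         "producto_no_disponible",
--         "unavailable",
--     ]
--     return any(term in lowered for term in banned_terms)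
-- ===== SOURCE B (Python) =====
-- _BANNED_TERMS = (
--     "404",
--     "notfound",
--     "not-found",
--     "productlinknotfound",
--     "linknotfound",
--     "page-not-found",
--     "no-encontrado",
--     "no_encontrado",
--     "agotado",
--     "out-of-stock",
--     "out_of_stock",
--     "no-disponible",
--     "no_disponible",
--     "producto-no-disponible",
--     "producto_no_disponible",
--     "unavailable",
-- )
--
-- def _contains_banned_terms(text: str) -> bool:
--     # single left-to-right pass: at each position, test whether a banned term starts there
--     lowered = text.lower()
--     for i in range(len(lowered)):
--         if any(lowered.startswith(term, i) for term in _BANNED_TERMS):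
--             return True
--     return False
-- ===== Notes on version B (the rewrite author's own statement) =====
-- stated objective: alternative
-- what changed: B makes one left-to-right pass over the lowered text, testing at each position whether any banned term starts there (prefix test), instead of A's 16 independent full substring scans; the empty-text guard disappears since the position loop is empty.
import Mathlib
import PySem

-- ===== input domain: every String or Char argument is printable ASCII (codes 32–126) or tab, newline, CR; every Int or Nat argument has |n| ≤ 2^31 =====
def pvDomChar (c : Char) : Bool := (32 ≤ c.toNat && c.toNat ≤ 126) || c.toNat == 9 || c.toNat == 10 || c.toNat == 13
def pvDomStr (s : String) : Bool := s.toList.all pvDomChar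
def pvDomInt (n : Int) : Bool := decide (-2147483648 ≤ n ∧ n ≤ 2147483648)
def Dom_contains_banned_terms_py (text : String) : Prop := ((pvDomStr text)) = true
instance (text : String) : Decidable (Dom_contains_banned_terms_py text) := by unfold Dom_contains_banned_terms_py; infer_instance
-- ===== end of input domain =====

-- B replaces A's 16 independent full substring scans by one left-to-right pass that
-- tests, at each position of the lowered text, whether a banned term starts there
-- (objective: alternative single-pass traversal, same exact result).

-- ===== PORT A =====
-- the banned_terms list literal from A's body
def bannedTermsA : List String :=
  ["404", "notfound", "not-found", "productlinknotfound", "linknotfound",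
   "page-not-found", "no-encontrado", "no_encontrado", "agotado",
   "out-of-stock", "out_of_stock", "no-disponible", "no_disponible",
   "producto-no-disponible", "producto_no_disponible", "unavailable"]

def contains_banned_terms_py (text : String) : Bool :=
  if text == "" then false
  else
    let lowered := PySem.Str.lower text
    bannedTermsA.any (fun term => PySem.Str.isIn term lowered)

-- ===== PORT B =====
-- the _BANNED_TERMS tuple from Source B
def bannedTermsB : List String :=
  ["404", "notfound", "not-found", "productlinknotfound", "linknotfound",
   "page-not-found", "no-encontrado", "no_encontrado", "agotado",
   "out-of-stock", "out_of_stock", "no-disponible", "no_disponible",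
   "producto-no-disponible", "producto_no_disponible", "unavailable"]

-- the position loop of Source B: walk the suffixes of the lowered text left to right,
-- returning true at the first position where some banned term is a prefix
def scanBanned : List Char → Bool
  | [] => false
  | c :: rest =>
      if bannedTermsB.any (fun term => term.toList.isPrefixOf (c :: rest)) then true
      else scanBanned rest

def contains_banned_terms_py_alt (text : String) : Bool :=
  scanBanned (PySem.Chars.lower text.toList)

-- ===== PRECONDITION & SPEC =====
def Spec_contains_banned_terms_py (text : String) (out : Bool) : Prop := out = contains_banned_terms_py_alt text
instance (text : String) (out : Bool) : Decidable (Spec_contains_banned_terms_py text out) := by unfold Spec_contains_banned_terms_py; infer_instance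

-- ===== CLAIM (what is proved, stated in full; the proofs are below) =====
def Claim_equal_contains_banned_terms_py : Prop := ∀ (text : String), Dom_contains_banned_terms_py text → Spec_contains_banned_terms_py text (contains_banned_terms_py text)

-- ===== LEMMAS AND PROOFS =====

-- B's suffix walk finds a match iff some banned term is a prefix of some suffix
theorem scanBanned_iff (cs : List Char) :
    scanBanned cs = true ↔ ∃ j, ∃ t ∈ bannedTermsB, t.toList <+: cs.drop j := by
  induction cs with
  | nil =>
      simp only [scanBanned]
      constructor
      · intro h; exact absurd h (by simp)
      rintro ⟨j, t, ht, hp⟩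
      rw [List.drop_nil, List.prefix_nil] at hp
      fin_cases ht <;> simp at hp
  | cons c rest ih =>
      simp only [scanBanned]
      split_ifs with h
      · simp only [true_iff]
        rw [List.any_eq_true] at h
        obtain ⟨t, ht, hp⟩ := h
        exact ⟨0, t, ht, by simpa using (List.isPrefixOf_iff_prefix).mp hp⟩
      · rw [ih]
        constructor
        · rintro ⟨j, t, ht, hp⟩; exact ⟨j + 1, t, ht, by simpa using hp⟩
        · rintro ⟨j, t, ht, hp⟩
          cases j with
          | zero =>
              exfalso
              rw [List.any_eq_true] at h
              exact h ⟨t, ht, (List.isPrefixOf_iff_prefix).mpr (by simpa using hp)⟩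
          | succ j => exact ⟨j, t, ht, by simpa using hp⟩

-- ===== VERDICT (by name: the statement is the Claim_ definition above) =====
theorem contains_banned_terms_py_spec : Claim_equal_contains_banned_terms_py := by
  intro text _
  unfold Spec_contains_banned_terms_py contains_banned_terms_py contains_banned_terms_py_alt
  by_cases hε : text = ""
  · subst hε; decide
  · rw [if_neg (by simpa using hε)]
    rw [Bool.eq_iff_iff, List.any_eq_true, scanBanned_iff]
    constructor
    · rintro ⟨t, ht, hin⟩
      rw [PySem.Str.isIn_iff_infix, PySem.Str.toList_lower] at hin
      obtain ⟨j, hp⟩ := (PySem.Chars.exists_prefix_drop_iff_isIn _ _).mpr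
        ((PySem.Chars.isIn_iff_infix _ _).mpr hin)
      exact ⟨j, t, ht, hp⟩
    · rintro ⟨j, t, ht, hp⟩
      refine ⟨t, ht, ?_⟩
      rw [PySem.Str.isIn_iff_infix, PySem.Str.toList_lower]
      exact (PySem.Chars.isIn_iff_infix _ _).mp
        ((PySem.Chars.exists_prefix_drop_iff_isIn _ _).mp ⟨j, hp⟩)
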